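-- pv_equiv track=rewrite | github.com/ValentinCarlu/prologin | Entrainement Qualification 2024/qual1_2024.py | le_plus_grand_saut
-- ===== SOURCE A (Python) =====
-- def le_plus_grand_saut(n : int, differences : list) -> None:
--     if min(differences) >= 0 :
--         return max(differences)
--     else :
--         hauteurs = []
--         hoder = 1
--         for nb in differences :
--             hauteurs.append(hoder+nb)
--             hoder += nb
--         return max(differences[0:hauteurs.index(max(hauteurs))+1])
-- ===== SOURCE B (Python) =====
-- def le_plus_grand_saut(n: int, differences: list) -> None:
--     # One pass: track the running height, the running max difference, the best
--     # (strictly greater) height seen so far, and the answer at that peak.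
--     run_sum = 1
--     run_max = None
--     best = None
--     ans = None
--     for nb in differences:
--         if run_max is None or nb > run_max:
--             run_max = nb
--         run_sum += nb
--         if best is None or run_sum > best:
--             best = run_sum
--             ans = run_max
--     return ans
-- ===== Notes on version B (the rewrite author's own statement) =====
-- stated objective: simpler
-- what changed: A builds the full height list, finds the index of its maximum, then slices and re-scans for a max in separate phases (plus a min() pre-scan to pick a branch); B is one fused loop over the differences maintaining a running sum, running max, best height and answer, with no intermediate list and no branch on min(differences).
import Mathlib
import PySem

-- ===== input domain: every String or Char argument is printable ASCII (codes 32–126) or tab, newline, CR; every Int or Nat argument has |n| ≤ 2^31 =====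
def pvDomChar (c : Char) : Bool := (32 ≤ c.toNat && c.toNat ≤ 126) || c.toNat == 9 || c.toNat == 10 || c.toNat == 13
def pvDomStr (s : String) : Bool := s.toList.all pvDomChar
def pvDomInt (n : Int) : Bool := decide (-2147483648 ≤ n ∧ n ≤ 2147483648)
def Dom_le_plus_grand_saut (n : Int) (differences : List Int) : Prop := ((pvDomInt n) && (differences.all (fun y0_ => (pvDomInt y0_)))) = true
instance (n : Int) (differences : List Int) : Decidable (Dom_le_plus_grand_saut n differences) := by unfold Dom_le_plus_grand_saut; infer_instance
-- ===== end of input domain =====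

-- B fuses A's three phases (build height list, index its max, max over a slice) into a
-- single loop over the differences keeping a running sum, running max, best height and
-- answer; objective: simpler (one pass, no intermediate list).

-- ===== PORT A =====
-- loop body of A's 'for nb in differences' (builds hauteurs, updates hoder)
def aStep (acc : List Int × Int) (nb : Int) : List Int × Int :=
  (acc.1 ++ [acc.2 + nb], acc.2 + nb)

def le_plus_grand_saut (n : Int) (differences : List Int) : Int :=
  match PySem.List.min? differences (fun y => y) with
  | none => 0   -- min([]) raises ValueError: excluded by Pre_
  | some m =>
    if m ≥ 0 then
      (PySem.List.max? differences (fun y => y)).getD 0   -- max([]) unreachable here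
    else
      let st := differences.foldl aStep ([], 1)
      let hauteurs := st.1
      let mh := (PySem.List.max? hauteurs (fun y => y)).getD 0
      let idx := (PySem.List.index? hauteurs mh).getD 0
      (PySem.List.max? (PySem.List.slice differences (some 0) (some ((idx : Int) + 1))) (fun y => y)).getD 0

-- ===== PORT B =====
-- loop body of B: state = (run_sum, run_max, best, ans)
def bStep (s : Int × Option Int × Option Int × Option Int) (nb : Int) :
    Int × Option Int × Option Int × Option Int :=
  let runMax : Int := match s.2.1 with
    | none => nb
    | some m => if nb > m then nb else m
  let runSum := s.1 + nb
  match s.2.2.1 with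
  | none => (runSum, some runMax, some runSum, some runMax)
  | some b =>
    if runSum > b then (runSum, some runMax, some runSum, some runMax)
    else (runSum, some runMax, some b, s.2.2.2)

def le_plus_grand_saut_alt (n : Int) (differences : List Int) : Int :=
  let st := differences.foldl bStep (1, none, none, none)
  st.2.2.2.getD 0   -- None only on the empty list, which Pre_ excludes

-- ===== PRECONDITION & SPEC =====
-- A raises ValueError (min of empty sequence) on the empty list; Pre_ excludes exactly that.
def Pre_le_plus_grand_saut (n : Int) (differences : List Int) : Prop := differences ≠ []
instance (n : Int) (differences : List Int) : Decidable (Pre_le_plus_grand_saut n differences) := by unfold Pre_le_plus_grand_saut; infer_instance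

def pvWitness_le_plus_grand_saut : Int × List Int := (3, [1, -2, 3])

def Spec_le_plus_grand_saut (n : Int) (differences : List Int) (out : Int) : Prop := out = le_plus_grand_saut_alt n differences
instance (n : Int) (differences : List Int) (out : Int) : Decidable (Spec_le_plus_grand_saut n differences out) := by unfold Spec_le_plus_grand_saut; infer_instance

-- ===== CLAIM (what is proved, stated in full; the proofs are below) =====
def Claim_equal_le_plus_grand_saut : Prop := ∀ (n : Int) (differences : List Int), Dom_le_plus_grand_saut n differences → Pre_le_plus_grand_saut n differences → Spec_le_plus_grand_saut n differences (le_plus_grand_saut n differences)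

-- ===== LEMMAS AND PROOFS =====

-- max(l) as A and B compute it (0 default is unreachable on nonempty lists)
def maxOf (l : List Int) : Int := (PySem.List.max? l (fun y => y)).getD 0

-- the hauteurs list A builds, starting from hoder = c
def hts : Int → List Int → List Int
  | _, [] => []
  | c, x :: xs => (c + x) :: hts (c + x) xs

-- first index of the maximal height
def idxMax (p : List Int) : Nat := (PySem.List.index? (hts 1 p) (maxOf (hts 1 p))).getD 0

-- A's answer in the negative branch
def ansOf (p : List Int) : Int := maxOf (p.take (idxMax p + 1))

lemma hts_append (c : Int) (p : List Int) (x : Int) :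
    hts c (p ++ [x]) = hts c p ++ [c + p.sum + x] := by
  induction p generalizing c with
  | nil => simp [hts]
  | cons y ys ih => simp [hts, ih (c + y)]; ring_nf

lemma length_hts (c : Int) (p : List Int) : (hts c p).length = p.length := by
  induction p generalizing c with
  | nil => rfl
  | cons y ys ih => simp [hts, ih]

lemma max?_eq_some_maxOf {l : List Int} (hl : l ≠ []) :
    PySem.List.max? l (fun y => y) = some (maxOf l) := by
  rcases h : PySem.List.max? l (fun y => y) with _ | m
  · exact absurd ((PySem.List.max?_eq_none_iff _ _).mp h) hl
  · simp [maxOf, h]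

lemma maxOf_singleton (x : Int) : maxOf [x] = x := by
  simp [maxOf, PySem.List.max?_id_cons]

lemma le_maxOf {l : List Int} {y : Int} (h : y ∈ l) : y ≤ maxOf l := by
  have hl : l ≠ [] := by rintro rfl; cases h
  exact PySem.List.max?_isMax (max?_eq_some_maxOf hl) y h

lemma maxOf_mem {l : List Int} (hl : l ≠ []) : maxOf l ∈ l :=
  PySem.List.max?_mem (max?_eq_some_maxOf hl)

lemma maxOf_append_singleton {l : List Int} (hl : l ≠ []) (x : Int) :
    maxOf (l ++ [x]) = max (maxOf l) x := by
  rcases l with _ | ⟨y, t⟩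
  · cases hl rfl
  · simp [maxOf, PySem.List.max?_id_cons, List.foldl_append]

lemma idxMax_lt {p : List Int} (hp : p ≠ []) : idxMax p < p.length := by
  have hne : hts 1 p ≠ [] := by
    intro h
    have := length_hts 1 p
    rw [h] at this
    exact hp (List.eq_nil_of_length_eq_zero this.symm)
  have hmem := maxOf_mem hne
  rcases hk : PySem.List.index? (hts 1 p) (maxOf (hts 1 p)) with _ | k
  · rw [PySem.List.index?_eq_none_iff] at hk; exact absurd hmem hk
  · obtain ⟨hklt, -, -⟩ := PySem.List.getElem_of_index?_eq_some hk
    rw [length_hts] at hklt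
    simp only [idxMax, hk, Option.getD_some]
    exact hklt

lemma idxMax_append_gt {p : List Int} (hp : p ≠ []) {x : Int}
    (h : maxOf (hts 1 p) < 1 + p.sum + x) :
    idxMax (p ++ [x]) = p.length ∧ maxOf (hts 1 (p ++ [x])) = 1 + p.sum + x := by
  have hne : hts 1 p ≠ [] := by
    intro hnil
    have := length_hts 1 p
    rw [hnil] at this
    exact hp (List.eq_nil_of_length_eq_zero this.symm)
  have hmax : maxOf (hts 1 (p ++ [x])) = 1 + p.sum + x := by
    rw [hts_append, maxOf_append_singleton hne]
    omega
  refine ⟨?_, hmax⟩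
  have hnotmem : (1 + p.sum + x) ∉ hts 1 p := by
    intro hm
    exact absurd (le_maxOf hm) (by omega)
  unfold idxMax
  rw [hmax, hts_append, PySem.List.index?_append_singleton_self _ _ hnotmem]
  simp [length_hts]

lemma idxMax_append_le {p : List Int} (hp : p ≠ []) {x : Int}
    (h : 1 + p.sum + x ≤ maxOf (hts 1 p)) :
    idxMax (p ++ [x]) = idxMax p ∧ maxOf (hts 1 (p ++ [x])) = maxOf (hts 1 p) := by
  have hne : hts 1 p ≠ [] := by
    intro hnil
    have := length_hts 1 p
    rw [hnil] at this
    exact hp (List.eq_nil_of_length_eq_zero this.symm)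
  have hmax : maxOf (hts 1 (p ++ [x])) = maxOf (hts 1 p) := by
    rw [hts_append, maxOf_append_singleton hne]
    omega
  refine ⟨?_, hmax⟩
  have hidx := PySem.List.index?_append_of_mem [1 + p.sum + x] (maxOf_mem hne)
  unfold idxMax
  rw [hmax, hts_append, hidx]

lemma bInv (p : List Int) (hp : p ≠ []) :
    p.foldl bStep (1, none, none, none) =
      (1 + p.sum, some (maxOf p), some (maxOf (hts 1 p)), some (ansOf p)) := by
  induction p using List.reverseRecOn with
  | nil => cases hp rfl
  | append_singleton p x ih =>
    rcases eq_or_ne p [] with rfl | hp'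
    · simp [bStep, maxOf_singleton, hts, ansOf, idxMax]
    · rw [List.foldl_append, ih hp']
      have hmax : maxOf (p ++ [x]) = max (maxOf p) x := maxOf_append_singleton hp' x
      by_cases hgt : maxOf (hts 1 p) < 1 + p.sum + x
      · obtain ⟨hidx, hm⟩ := idxMax_append_gt hp' hgt
        have htake : (p ++ [x]).take (idxMax (p ++ [x]) + 1) = p ++ [x] := by
          rw [hidx]
          exact List.take_of_length_le (by simp)
        have hans : ansOf (p ++ [x]) = max (maxOf p) x := by
          rw [ansOf, htake, hmax]
        simp only [List.foldl_cons, List.foldl_nil, bStep, if_pos hgt, Prod.mk.injEq,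
          Option.some.injEq, List.sum_append, List.sum_cons, List.sum_nil, gt_iff_lt, hmax, hans, hm]
        refine ⟨by ring, by omega, trivial, by omega⟩
      · rw [not_lt] at hgt
        obtain ⟨hidx, hm⟩ := idxMax_append_le hp' hgt
        have htake : (p ++ [x]).take (idxMax (p ++ [x]) + 1) = p.take (idxMax p + 1) := by
          rw [hidx]
          exact List.take_append_of_le_length (idxMax_lt hp')
        have hans : ansOf (p ++ [x]) = ansOf p := by rw [ansOf, htake]; rfl
        simp only [List.foldl_cons, List.foldl_nil, bStep, if_neg (not_lt.mpr hgt),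
          Prod.mk.injEq, Option.some.injEq, List.sum_append, List.sum_cons, List.sum_nil,
          gt_iff_lt, hmax, hans, hm]
        refine ⟨by ring, by omega, trivial⟩


lemma aLoop (p : List Int) (acc : List Int) (c : Int) :
    p.foldl aStep (acc, c) = (acc ++ hts c p, c + p.sum) := by
  induction p generalizing acc c with
  | nil => simp [hts]
  | cons y ys ih => simp [aStep, hts, ih]; ring

lemma ansOf_nonneg (p : List Int) (hp : p ≠ []) (h : ∀ y ∈ p, 0 ≤ y) :
    maxOf (hts 1 p) = 1 + p.sum ∧ ansOf p = maxOf p := by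
  induction p using List.reverseRecOn with
  | nil => cases hp rfl
  | append_singleton p x ih =>
    have hx : 0 ≤ x := h x (by simp)
    rcases eq_or_ne p [] with rfl | hp'
    · constructor
      · simp [hts, maxOf_singleton]
      · simp [ansOf, idxMax, hts, maxOf_singleton]
    · obtain ⟨ihm, iha⟩ := ih hp' (fun y hy => h y (by simp [hy]))
      have hmax : maxOf (p ++ [x]) = max (maxOf p) x := maxOf_append_singleton hp' x
      rcases lt_or_eq_of_le hx with hpos | hzero
      · have hgt : maxOf (hts 1 p) < 1 + p.sum + x := by omega
        obtain ⟨hidx, hm⟩ := idxMax_append_gt hp' hgt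
        refine ⟨by simp [hm]; ring, ?_⟩
        rw [ansOf, hidx, List.take_of_length_le (by simp)]
      · -- x = 0
        subst hzero
        have hle : 1 + p.sum + 0 ≤ maxOf (hts 1 p) := by omega
        obtain ⟨hidx, hm⟩ := idxMax_append_le hp' hle
        have h0 : (0 : Int) ≤ maxOf p := by
          rcases p with _ | ⟨y, t⟩
          · cases hp' rfl
          · exact le_trans (h y (by simp)) (le_maxOf (by simp))
        constructor
        · rw [hm, ihm]; simp
        · rw [ansOf, hidx, List.take_append_of_le_length (idxMax_lt hp'), ← ansOf, iha, hmax]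
          omega


-- ===== VERDICT (by name: the statement is the Claim_ definition above) =====
theorem le_plus_grand_saut_spec : Claim_equal_le_plus_grand_saut := by
  intro n p _ hp
  have hpne : p ≠ [] := hp
  unfold Spec_le_plus_grand_saut le_plus_grand_saut le_plus_grand_saut_alt
  have hminne : PySem.List.min? p (fun y => y) ≠ none := by
    intro hcon
    exact hpne ((PySem.List.min?_eq_none_iff _ _).mp hcon)
  rcases hmin : PySem.List.min? p (fun y => y) with _ | m
  · exact absurd hmin hminne
  · rw [bInv p hpne]
    by_cases hm : m ≥ 0
    · -- all elements nonnegative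
      have hall : ∀ y ∈ p, 0 ≤ y := fun y hy =>
        le_trans hm (PySem.List.min?_isMin hmin y hy)
      obtain ⟨-, ha⟩ := ansOf_nonneg p hpne hall
      simp [hm, max?_eq_some_maxOf hpne, ha]
    · -- negative branch: A computes max over the slice up to the first max height
      have hne : hts 1 p ≠ [] := by
        intro hnil
        have := length_hts 1 p
        rw [hnil] at this
        exact hpne (List.eq_nil_of_length_eq_zero this.symm)
      simp only [hm, if_false, aLoop p [] 1, List.nil_append]
      rw [max?_eq_some_maxOf hne]
      simp only [Option.getD_some]
      have hidxeq : (PySem.List.index? (hts 1 p) (maxOf (hts 1 p))).getD 0 = idxMax p := rfl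
      rw [hidxeq]
      have hslice : PySem.List.slice p (some 0) (some ((idxMax p : Int) + 1)) =
          p.take (idxMax p + 1) := by
        have htn : ((idxMax p : Int) + 1).toNat = idxMax p + 1 := by omega
        rw [PySem.List.slice_zero_start, PySem.List.slice_to p (by positivity), htn]
      rw [hslice, max?_eq_some_maxOf (by simp [List.take_eq_nil_iff, hpne])]
      rfl
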